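-- pv_equiv track=rewrite | github.com/xiangli-sophgo/Tier6-Model | backend/tests/test_fa2_comparison.py | softmax_theoretical_and_real_ds
-- ===== SOURCE A (Python) =====
-- def align_up(x, y):
--     return ((x + y - 1) // y) * y
--
-- SOFTMAX_STEPS = [
--     ('add', 0, 1),
--     ('reduce_max', 1, 1),
--     ('max', 1, 1),
--     ('fuse_exp', 0, 35),
--     ('fuse_exp', 1, 35),
--     ('reduce_sum', 1, 1),
--     ('mul', 1, 1),
--     ('add', 1, 1),
--     ('copy', 1, 1),
--     ('data_convert', 0, 1),
-- ]
--
-- def softmax_theoretical_and_real_ds(QS, KS, lane_num, eu_num, dtype_bytes):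
--     """DS_TPU softmax 估算"""
--     def calc_step_theo(shape_type, op_count):
--         if shape_type == 0:
--             return (
--                 align_up(QS, lane_num) *
--                 align_up(KS, eu_num // lane_num // dtype_bytes) *
--                 op_count
--             )
--         else:
--             return align_up(QS, lane_num) * op_count
--
--     def calc_step_real(shape_type, op_count):
--         if shape_type == 0:
--             return QS * 1 * KS * op_count
--         else:
--             return QS * 1 * 1 * op_count
--
--     vector_theo, vector_real = 0, 0
--     for _, shape_type, op_count in SOFTMAX_STEPS:
--         vector_theo += calc_step_theo(shape_type, op_count)
--         vector_real += calc_step_real(shape_type, op_count)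
--     return vector_theo, vector_real
-- ===== SOURCE B (Python) =====
-- def align_up(x, y):
--     return ((x + y - 1) // y) * y
--
-- SOFTMAX_STEPS = [
--     ('add', 0, 1),
--     ('reduce_max', 1, 1),
--     ('max', 1, 1),
--     ('fuse_exp', 0, 35),
--     ('fuse_exp', 1, 35),
--     ('reduce_sum', 1, 1),
--     ('mul', 1, 1),
--     ('add', 1, 1),
--     ('copy', 1, 1),
--     ('data_convert', 0, 1),
-- ]
--
-- def softmax_theoretical_and_real_ds(QS, KS, lane_num, eu_num, dtype_bytes):
--     """DS_TPU softmax estimate via closed forms over per-shape op-count totals."""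
--     s0 = sum(c for _, t, c in SOFTMAX_STEPS if t == 0)
--     s1 = sum(c for _, t, c in SOFTMAX_STEPS if t == 1)
--     q = align_up(QS, lane_num)
--     k = align_up(KS, eu_num // lane_num // dtype_bytes)
--     return q * (k * s0 + s1), QS * (KS * s0 + s1)
-- ===== Notes on version B (the rewrite author's own statement) =====
-- stated objective: simpler
-- what changed: Replaces the per-step conditional accumulation of both totals with a grouping pass that sums op_counts per shape_type, then returns the two results as closed-form products by distributivity.
import Mathlib
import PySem

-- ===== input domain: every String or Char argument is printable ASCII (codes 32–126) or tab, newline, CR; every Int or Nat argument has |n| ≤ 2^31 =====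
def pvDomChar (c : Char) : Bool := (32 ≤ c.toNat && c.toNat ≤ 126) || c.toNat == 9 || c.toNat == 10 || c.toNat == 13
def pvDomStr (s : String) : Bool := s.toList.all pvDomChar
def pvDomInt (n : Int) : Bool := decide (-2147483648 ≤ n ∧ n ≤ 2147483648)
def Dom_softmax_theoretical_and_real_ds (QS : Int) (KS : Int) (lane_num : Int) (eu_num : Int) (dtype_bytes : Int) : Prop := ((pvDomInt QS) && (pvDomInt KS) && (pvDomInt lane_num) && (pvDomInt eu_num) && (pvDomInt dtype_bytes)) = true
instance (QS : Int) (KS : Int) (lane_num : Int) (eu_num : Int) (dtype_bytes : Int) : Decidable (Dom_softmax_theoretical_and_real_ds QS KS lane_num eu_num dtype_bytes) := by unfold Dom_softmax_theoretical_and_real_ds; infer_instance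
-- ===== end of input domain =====

-- B replaces the per-step conditional accumulation with one grouping pass (op-count totals per
-- shape_type) and two closed-form products; objective: simpler.

-- ===== PORT A =====
def pvAlignUp (x y : Int) : Int := PySem.Int.floordiv (x + y - 1) y * y

def pvSteps : List (String × Int × Int) :=
  [("add", 0, 1), ("reduce_max", 1, 1), ("max", 1, 1), ("fuse_exp", 0, 35),
   ("fuse_exp", 1, 35), ("reduce_sum", 1, 1), ("mul", 1, 1), ("add", 1, 1),
   ("copy", 1, 1), ("data_convert", 0, 1)]

def softmax_theoretical_and_real_ds (QS : Int) (KS : Int) (lane_num : Int) (eu_num : Int) (dtype_bytes : Int) : Int × Int :=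
  let calc_step_theo : Int → Int → Int := fun shape_type op_count =>
    if shape_type == 0 then
      pvAlignUp QS lane_num *
        pvAlignUp KS (PySem.Int.floordiv (PySem.Int.floordiv eu_num lane_num) dtype_bytes) *
        op_count
    else pvAlignUp QS lane_num * op_count
  let calc_step_real : Int → Int → Int := fun shape_type op_count =>
    if shape_type == 0 then QS * 1 * KS * op_count else QS * 1 * 1 * op_count
  pvSteps.foldl
    (fun acc s => (acc.1 + calc_step_theo s.2.1 s.2.2, acc.2 + calc_step_real s.2.1 s.2.2))
    (0, 0)

-- ===== PORT B =====
def softmax_theoretical_and_real_ds_alt (QS : Int) (KS : Int) (lane_num : Int) (eu_num : Int) (dtype_bytes : Int) : Int × Int :=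
  let s0 : Int := ((pvSteps.filter (fun s => s.2.1 == 0)).map (fun s => s.2.2)).sum
  let s1 : Int := ((pvSteps.filter (fun s => s.2.1 == 1)).map (fun s => s.2.2)).sum
  let q := pvAlignUp QS lane_num
  let k := pvAlignUp KS (PySem.Int.floordiv (PySem.Int.floordiv eu_num lane_num) dtype_bytes)
  (q * (k * s0 + s1), QS * (KS * s0 + s1))

-- ===== PRECONDITION & SPEC =====
-- A raises ZeroDivisionError when lane_num = 0, dtype_bytes = 0, or eu_num//lane_num//dtype_bytes = 0;
-- exactly those inputs are excluded (B raises there too).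
def Pre_softmax_theoretical_and_real_ds (QS : Int) (KS : Int) (lane_num : Int) (eu_num : Int) (dtype_bytes : Int) : Prop :=
  lane_num ≠ 0 ∧ dtype_bytes ≠ 0 ∧
  PySem.Int.floordiv (PySem.Int.floordiv eu_num lane_num) dtype_bytes ≠ 0
instance (QS : Int) (KS : Int) (lane_num : Int) (eu_num : Int) (dtype_bytes : Int) : Decidable (Pre_softmax_theoretical_and_real_ds QS KS lane_num eu_num dtype_bytes) := by unfold Pre_softmax_theoretical_and_real_ds; infer_instance

def pvWitness_softmax_theoretical_and_real_ds : Int × Int × Int × Int × Int := (128, 256, 64, 512, 2)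

def Spec_softmax_theoretical_and_real_ds (QS : Int) (KS : Int) (lane_num : Int) (eu_num : Int) (dtype_bytes : Int) (out : Int × Int) : Prop := out = softmax_theoretical_and_real_ds_alt QS KS lane_num eu_num dtype_bytes
instance (QS : Int) (KS : Int) (lane_num : Int) (eu_num : Int) (dtype_bytes : Int) (out : Int × Int) : Decidable (Spec_softmax_theoretical_and_real_ds QS KS lane_num eu_num dtype_bytes out) := by unfold Spec_softmax_theoretical_and_real_ds; infer_instance

-- ===== CLAIM (what is proved, stated in full; the proofs are below) =====
def Claim_equal_softmax_theoretical_and_real_ds : Prop := ∀ (QS : Int) (KS : Int) (lane_num : Int) (eu_num : Int) (dtype_bytes : Int), Dom_softmax_theoretical_and_real_ds QS KS lane_num eu_num dtype_bytes → Pre_softmax_theoretical_and_real_ds QS KS lane_num eu_num dtype_bytes → Spec_softmax_theoretical_and_real_ds QS KS lane_num eu_num dtype_bytes (softmax_theoretical_and_real_ds QS KS lane_num eu_num dtype_bytes)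

-- ===== LEMMAS AND PROOFS =====

-- ===== VERDICT (by name: the statement is the Claim_ definition above) =====
theorem softmax_theoretical_and_real_ds_spec : Claim_equal_softmax_theoretical_and_real_ds := by
  intro QS KS lane_num eu_num dtype_bytes _ _
  unfold Spec_softmax_theoretical_and_real_ds
  simp [softmax_theoretical_and_real_ds, softmax_theoretical_and_real_ds_alt, pvSteps,
    List.foldl, List.filter_nil]
  constructor <;> ring
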